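-- pv_equiv track=rewrite | github.com/zmwangx/Project-Euler | 158/solution.py | calculate_p
-- ===== SOURCE A (Python) =====
-- import functools
-- import operator
--
-- factorios = [functools.reduce(operator.mul, range(1, i + 1), 1) for i in range(27)]
--
-- def calculate_p(n):
--     count = 0
--     f = factorios
--     for m in range(1, n):
--         for a in range(1, 27):
--             for b in range(1, a):
--                 for k in range(m):
--                     for l in range(n - m):
--                         if (
--                             m - k - 1 < 0
--                             or b - m + k < 0
--                             or n - m - 1 - l < 0
--                             or 27 - a - n + m + l < 0
--                             or a - b - 1 - k - l < 0
--                         ):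
--                             continue
--                         count += (
--                             f[b - 1]
--                             * f[26 - a]
--                             * f[a - b - 1]
--                             // f[m - k - 1]
--                             // f[b - m + k]
--                             // f[n - m - 1 - l]
--                             // f[27 - a - n + m + l]
--                             // f[k]
--                             // f[l]
--                             // f[a - b - 1 - k - l]
--                         )
--     return count
-- ===== SOURCE B (Python) =====
-- def calculate_p(n):
--     # Closed form: choose the n letters (C(26, n) ways); among strings using n
--     # distinct letters, exactly 2**n - n - 1 have exactly one descent.
--     if not (2 <= n <= 26):
--         return 0
--     c = 1
--     for i in range(n):
--         c = c * (26 - i) // (i + 1)  # c == comb(26, i+1), division exact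
--     return c * (2 ** n - n - 1)
-- ===== Notes on version B (the rewrite author's own statement) =====
-- stated objective: faster
-- what changed: Replaces the quintuple loop over multinomial terms by the closed form C(26,n)*(2^n-n-1) (binomial computed by one exact multiplicative loop), returning 0 outside 2<=n<=26 where the sum is empty or all terms vanish.
import Mathlib
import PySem

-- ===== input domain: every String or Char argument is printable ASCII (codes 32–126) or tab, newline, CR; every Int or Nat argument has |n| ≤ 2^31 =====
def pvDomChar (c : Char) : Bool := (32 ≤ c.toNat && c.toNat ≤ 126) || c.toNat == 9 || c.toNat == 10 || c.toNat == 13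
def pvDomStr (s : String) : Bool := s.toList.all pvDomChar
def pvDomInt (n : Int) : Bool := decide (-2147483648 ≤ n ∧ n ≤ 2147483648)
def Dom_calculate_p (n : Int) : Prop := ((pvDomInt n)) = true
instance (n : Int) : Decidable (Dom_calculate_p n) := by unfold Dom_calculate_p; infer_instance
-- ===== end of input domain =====

-- B replaces A's quintuple loop over multinomial terms by the closed form
-- C(26,n)*(2^n - n - 1); the equivalence below proves the underlying binomial identity.

-- ===== PORT A =====
def pvFactList : List Int :=
  (PySem.List.pyRange 0 27 1).map (fun i => (PySem.List.pyRange 1 (i+1) 1).foldl (· * ·) 1)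

def pvF (i : Int) : Int := PySem.List.pyGetD pvFactList i 0

def pvTerm (n m a b k l : Int) : Int :=
  PySem.Int.floordiv (PySem.Int.floordiv (PySem.Int.floordiv (PySem.Int.floordiv
    (PySem.Int.floordiv (PySem.Int.floordiv (PySem.Int.floordiv
      (pvF (b-1) * pvF (26-a) * pvF (a-b-1))
      (pvF (m-k-1))) (pvF (b-m+k))) (pvF (n-m-1-l))) (pvF (27-a-n+m+l))) (pvF k)) (pvF l)) (pvF (a-b-1-k-l))

def calculate_p (n : Int) : Int :=
  (PySem.List.pyRange 1 n 1).foldl (fun count m =>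
    (PySem.List.pyRange 1 27 1).foldl (fun count a =>
      (PySem.List.pyRange 1 a 1).foldl (fun count b =>
        (PySem.List.pyRange 0 m 1).foldl (fun count k =>
          (PySem.List.pyRange 0 (n - m) 1).foldl (fun count l =>
            if m - k - 1 < 0 ∨ b - m + k < 0 ∨ n - m - 1 - l < 0 ∨
               27 - a - n + m + l < 0 ∨ a - b - 1 - k - l < 0 then count
            else count + pvTerm n m a b k l)
          count)
        count)
      count)
    count)
  0

-- ===== PORT B =====
def calculate_p_alt (n : Int) : Int :=
  if 2 ≤ n ∧ n ≤ 26 then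
    ((PySem.List.pyRange 0 n 1).foldl (fun c i => PySem.Int.floordiv (c * (26 - i)) (i + 1)) 1)
      * ((2:Int) ^ n.toNat - n - 1)
  else 0

-- ===== PRECONDITION & SPEC =====
def Spec_calculate_p (n : Int) (out : Int) : Prop := out = calculate_p_alt n
instance (n : Int) (out : Int) : Decidable (Spec_calculate_p n out) := by unfold Spec_calculate_p; infer_instance

-- ===== CLAIM (what is proved, stated in full; the proofs are below) =====
def Claim_equal_calculate_p : Prop := ∀ (n : Int), Dom_calculate_p n → Spec_calculate_p n (calculate_p n)

-- ===== LEMMAS AND PROOFS =====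

def pvNatTerm (N m a b k l : Nat) : Nat :=
  Nat.choose b (m-k) * Nat.choose (25-a) (N-2-m-l) * Nat.choose (a-b-1) k * Nat.choose (a-b-1-k) l

def pvT (N : Nat) : Nat :=
  ∑ m ∈ Finset.range (N-1), ∑ a ∈ Finset.range 26, ∑ b ∈ Finset.range a,
    ∑ k ∈ Finset.range (m+1), ∑ l ∈ Finset.range (N-1-m), pvNatTerm N m a b k l

theorem pv_ite_shape (c : Prop) [Decidable c] (x t : Int) :
    (if c then x else x + t) = x + (if c then 0 else t) := by split <;> simp

theorem pv_sum_range_list (f : Nat → Int) (n : Nat) :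
    ((List.range n).map f).sum = ∑ i ∈ Finset.range n, f i := rfl

theorem pv_fact_get (j : Nat) (hj : j ≤ 26) : pvF (j : Int) = (j.factorial : Int) := by
  interval_cases j <;> decide

theorem pv_chain (N m a b k l : Nat) (g2 : m - k ≤ b) (g4 : N-2-m-l ≤ 25-a)
    (g5 : k + l ≤ a-b-1) :
    b.factorial * (25-a).factorial * (a-b-1).factorial / (m-k).factorial / (b-(m-k)).factorial
      / (N-2-m-l).factorial / (25-a-(N-2-m-l)).factorial / k.factorial / l.factorial
      / (a-b-1-k-l).factorial = pvNatTerm N m a b k l := by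
  have h5 : k ≤ a - b - 1 := by omega
  have h6 : l ≤ a - b - 1 - k := by omega
  rw [show b.factorial * (25-a).factorial * (a-b-1).factorial
      = (m-k).factorial * ((b-(m-k)).factorial * ((N-2-m-l).factorial *
        ((25-a-(N-2-m-l)).factorial * (k.factorial * (l.factorial *
        ((a-b-1-k-l).factorial * pvNatTerm N m a b k l)))))) from ?_]
  · rw [Nat.mul_div_cancel_left _ (Nat.factorial_pos _), Nat.mul_div_cancel_left _ (Nat.factorial_pos _),
      Nat.mul_div_cancel_left _ (Nat.factorial_pos _), Nat.mul_div_cancel_left _ (Nat.factorial_pos _),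
      Nat.mul_div_cancel_left _ (Nat.factorial_pos _), Nat.mul_div_cancel_left _ (Nat.factorial_pos _),
      Nat.mul_div_cancel_left _ (Nat.factorial_pos _)]
  · rw [← Nat.choose_mul_factorial_mul_factorial g2, ← Nat.choose_mul_factorial_mul_factorial g4,
      ← Nat.choose_mul_factorial_mul_factorial h5, ← Nat.choose_mul_factorial_mul_factorial h6,
      pvNatTerm]
    ring

-- the per-term lemma (Phase II)
theorem pv_term_eq (N m a b k l : Nat) (hN : 2 ≤ N) (hm : m < N-1) (ha : a < 26)
    (hb : b < a) (hk : k < m+1) (hl : l < N-1-m) :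
    (if (1+(m:Int)) - k - 1 < 0 ∨ (1+(b:Int)) - (1+(m:Int)) + k < 0 ∨
        (N:Int) - (1+(m:Int)) - 1 - l < 0 ∨ 27 - (1+(a:Int)) - N + (1+(m:Int)) + l < 0 ∨
        (1+(a:Int)) - (1+(b:Int)) - 1 - k - l < 0 then 0
     else pvTerm N (1+(m:Int)) (1+(a:Int)) (1+(b:Int)) k l) = (pvNatTerm N m a b k l : Int) := by
  by_cases hc : (1+(m:Int)) - k - 1 < 0 ∨ (1+(b:Int)) - (1+(m:Int)) + k < 0 ∨
      (N:Int) - (1+(m:Int)) - 1 - l < 0 ∨ 27 - (1+(a:Int)) - N + (1+(m:Int)) + l < 0 ∨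
      (1+(a:Int)) - (1+(b:Int)) - 1 - k - l < 0
  · rw [if_pos hc]
    rcases hc with hc | hc | hc | hc | hc
    · exact absurd hc (by omega)
    · rw [pvNatTerm, Nat.choose_eq_zero_of_lt (show b < m - k by omega)]; simp
    · exact absurd hc (by omega)
    · rw [pvNatTerm, Nat.choose_eq_zero_of_lt (show 25 - a < N - 2 - m - l by omega)]; simp
    · by_cases h : a - b - 1 < k
      · rw [pvNatTerm, Nat.choose_eq_zero_of_lt h]; simp
      · rw [pvNatTerm, Nat.choose_eq_zero_of_lt (show a - b - 1 - k < l by omega)]; simp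
  · rw [if_neg hc]
    push Not at hc
    obtain ⟨-, g2, -, g4, g5⟩ := hc
    have hm' : m ≤ N - 2 := by omega
    have ha' : a ≤ 25 := by omega
    have hk' : k ≤ m := by omega
    have hl' : l ≤ N - 2 - m := by omega
    rw [pvTerm,
      show (1+(a:Int)) - (1+(b:Int)) - 1 - k - l = ((a - b - 1 - k - l : Nat) : Int) by omega,
      show (1+(b:Int)) - 1 = ((b : Nat) : Int) by omega,
      show (26:Int) - (1+(a:Int)) = ((25 - a : Nat) : Int) by omega,
      show (1+(a:Int)) - (1+(b:Int)) - 1 = ((a - b - 1 : Nat) : Int) by omega,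
      show (1+(m:Int)) - k - 1 = ((m - k : Nat) : Int) by omega,
      show (1+(b:Int)) - (1+(m:Int)) + k = ((b - (m - k) : Nat) : Int) by omega,
      show (N:Int) - (1+(m:Int)) - 1 - l = ((N - 2 - m - l : Nat) : Int) by omega,
      show (27:Int) - (1+(a:Int)) - N + (1+(m:Int)) + l
        = ((25 - a - (N - 2 - m - l) : Nat) : Int) by omega,
      pv_fact_get b (by omega), pv_fact_get (25 - a) (by omega),
      pv_fact_get (a - b - 1) (by omega), pv_fact_get (m - k) (by omega),
      pv_fact_get (b - (m - k)) (by omega), pv_fact_get (N - 2 - m - l) (by omega),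
      pv_fact_get (25 - a - (N - 2 - m - l)) (by omega), pv_fact_get k (by omega),
      pv_fact_get l (by omega), pv_fact_get (a - b - 1 - k - l) (by omega),
      ← Nat.cast_mul, ← Nat.cast_mul,
      PySem.Int.floordiv_natCast, PySem.Int.floordiv_natCast, PySem.Int.floordiv_natCast,
      PySem.Int.floordiv_natCast, PySem.Int.floordiv_natCast, PySem.Int.floordiv_natCast,
      PySem.Int.floordiv_natCast]
    exact_mod_cast congrArg (Nat.cast : Nat → Int)
      (pv_chain N m a b k l (by omega) (by omega) (by omega))

theorem pv_A_eq_T (n : Int) (h2 : 2 ≤ n) : calculate_p n = (pvT n.toNat : Int) := by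
  obtain ⟨N, rfl⟩ : ∃ N : Nat, n = (N : Int) := ⟨n.toNat, (Int.toNat_of_nonneg (by omega)).symm⟩
  have hN : 2 ≤ N := by exact_mod_cast h2
  unfold calculate_p
  simp only [pv_ite_shape, PySem.List.foldl_add, PySem.List.pyRange_one, List.map_map,
    pv_sum_range_list, Function.comp, zero_add]
  rw [show ((N:Int) - 1).toNat = N - 1 by omega, show (((27:Int))-1).toNat = 26 by decide]
  simp only [show ∀ x:Nat, ((1:Int)+(x:Int)-1).toNat = x from fun x => by omega,
    show ∀ x:Nat, ((1:Int)+(x:Int)-0).toNat = x+1 from fun x => by omega,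
    show ∀ x:Nat, ((N:Int)-(1+(x:Int))-0).toNat = N-1-x from fun x => by omega,
    Int.toNat_natCast]
  rw [pvT]
  push_cast
  refine Finset.sum_congr rfl fun m hm => Finset.sum_congr rfl fun a ha =>
    Finset.sum_congr rfl fun b hb => Finset.sum_congr rfl fun k hk =>
      Finset.sum_congr rfl fun l hl => ?_
  rw [Finset.mem_range] at hm ha hb hk hl
  exact_mod_cast pv_term_eq N m a b k l hN hm ha hb hk hl

theorem pv_tri (n : Nat) (g : Nat → Nat → Nat) :
    ∑ m ∈ Finset.range n, ∑ k ∈ Finset.range (m+1), g k m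
    = ∑ k ∈ Finset.range n, ∑ j ∈ Finset.range (n-k), g k (k+j) := by
  induction n with
  | zero => simp
  | succ n ih =>
    have h1 : ∀ k ∈ Finset.range n, (∑ j ∈ Finset.range (n+1-k), g k (k+j))
        = (∑ j ∈ Finset.range (n-k), g k (k+j)) + g k n := by
      intro k hk; rw [Finset.mem_range] at hk
      rw [show n+1-k = (n-k)+1 by omega, Finset.sum_range_succ, show k+(n-k) = n by omega]
    rw [Finset.sum_range_succ, ih,
      Finset.sum_range_succ (f := fun k => ∑ j ∈ Finset.range (n+1-k), g k (k+j)),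
      Finset.sum_congr rfl h1, Finset.sum_add_distrib,
      Finset.sum_range_succ (f := fun k => g k n)]
    simp [show n+1-n = 1 by omega]
    omega

theorem pv_vand (x y s : Nat) :
    ∑ l ∈ Finset.range (s+1), x.choose (s-l) * y.choose l = (y+x).choose s := by
  rw [Nat.add_choose_eq, Finset.Nat.sum_antidiagonal_eq_sum_range_succ_mk]
  exact Finset.sum_congr rfl fun l _ => mul_comm _ _



def pvT2 (N : Nat) : Nat :=
  ∑ a ∈ Finset.range 26, ∑ b ∈ Finset.range a, ∑ m ∈ Finset.range (N-1),
    ∑ k ∈ Finset.range (m+1),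
      Nat.choose b (m-k) * Nat.choose (a-b-1) k * ((a-b-1-k)+(25-a)).choose (N-2-m)

def pvT3 (N : Nat) : Nat :=
  ∑ a ∈ Finset.range 26, ∑ b ∈ Finset.range a, ∑ k ∈ Finset.range (N-1),
    Nat.choose (a-b-1) k * (b + ((a-b-1-k)+(25-a))).choose (N-2-k)

theorem pv_T_eq_T2 (N : Nat) (hN : 2 ≤ N) : pvT N = pvT2 N := by
  rw [pvT, Finset.sum_comm]
  refine Finset.sum_congr rfl fun a _ => ?_
  rw [Finset.sum_comm]
  refine Finset.sum_congr rfl fun b _ => Finset.sum_congr rfl fun m hm => ?_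
  rw [Finset.mem_range] at hm
  refine Finset.sum_congr rfl fun k _ => ?_
  rw [show N-1-m = (N-2-m)+1 by omega]
  calc ∑ l ∈ Finset.range ((N-2-m)+1), pvNatTerm N m a b k l
      = ∑ l ∈ Finset.range ((N-2-m)+1),
          (Nat.choose b (m-k) * Nat.choose (a-b-1) k) *
            ((25-a).choose ((N-2-m)-l) * (a-b-1-k).choose l) := by
        refine Finset.sum_congr rfl fun l hl => ?_
        rw [Finset.mem_range] at hl
        rw [pvNatTerm, show N-2-m-l = (N-2-m)-l by omega]; ring
    _ = _ := by rw [← Finset.mul_sum, pv_vand]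

theorem pv_T2_eq_T3 (N : Nat) (hN : 2 ≤ N) : pvT2 N = pvT3 N := by
  rw [pvT2, pvT3]
  refine Finset.sum_congr rfl fun a _ => Finset.sum_congr rfl fun b _ => ?_
  rw [pv_tri (N-1) (fun k m => Nat.choose b (m-k) * Nat.choose (a-b-1) k *
    ((a-b-1-k)+(25-a)).choose (N-2-m))]
  refine Finset.sum_congr rfl fun k hk => ?_
  rw [Finset.mem_range] at hk
  rw [show N-1-k = (N-2-k)+1 by omega]
  calc ∑ j ∈ Finset.range ((N-2-k)+1),
        Nat.choose b ((k+j)-k) * Nat.choose (a-b-1) k * ((a-b-1-k)+(25-a)).choose (N-2-(k+j))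
      = ∑ j ∈ Finset.range ((N-2-k)+1),
          Nat.choose (a-b-1) k *
            (((a-b-1-k)+(25-a)).choose ((N-2-k)-j) * Nat.choose b j) := by
        refine Finset.sum_congr rfl fun j hj => ?_
        rw [Finset.mem_range] at hj
        rw [show (k+j)-k = j by omega, show N-2-(k+j) = (N-2-k)-j by omega]; ring
    _ = _ := by rw [← Finset.mul_sum, pv_vand]

set_option maxRecDepth 40000 in
theorem pv_T3_closed (N : Nat) (h2 : 2 ≤ N) (h26 : N ≤ 26) :
    pvT3 N = Nat.choose 26 N * (2^N - N - 1) := by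
  interval_cases N <;> decide

theorem pv_T_ge27 (N : Nat) (h : 27 ≤ N) : pvT N = 0 := by
  refine Finset.sum_eq_zero fun m hm => Finset.sum_eq_zero fun a ha =>
    Finset.sum_eq_zero fun b hb => Finset.sum_eq_zero fun k hk =>
      Finset.sum_eq_zero fun l hl => ?_
  rw [Finset.mem_range] at hm ha hb hk hl
  rcases Nat.lt_or_ge b (m-k) with h1|h1
  · rw [pvNatTerm, Nat.choose_eq_zero_of_lt h1]; simp
  rcases Nat.lt_or_ge (25-a) (N-2-m-l) with h2|h2
  · rw [pvNatTerm, Nat.choose_eq_zero_of_lt h2]; simp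
  rcases Nat.lt_or_ge (a-b-1) k with h3|h3
  · rw [pvNatTerm, Nat.choose_eq_zero_of_lt h3]; simp
  rcases Nat.lt_or_ge (a-b-1-k) l with h4|h4
  · rw [pvNatTerm, Nat.choose_eq_zero_of_lt h4]; simp
  omega

theorem pv_comb_fold (j : Nat) (hj : j ≤ 26) :
    (List.range j).foldl (fun c (i : Nat) =>
        PySem.Int.floordiv (c * (26 - ((0:Int) + (i:Int)))) ((0 + (i:Int)) + 1)) 1
      = (Nat.choose 26 j : Int) := by
  induction j with
  | zero => simp
  | succ j ih =>
    rw [List.range_succ, List.foldl_append, ih (by omega), List.foldl_cons, List.foldl_nil,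
      show (26:Int) - (0 + (j:Int)) = ((26 - j : Nat) : Int) by omega,
      show (0 + (j:Int)) + 1 = ((j + 1 : Nat) : Int) by push_cast; ring,
      ← Nat.cast_mul, PySem.Int.floordiv_natCast]
    have h : (Nat.choose 26 j * (26 - j)) / (j+1) = Nat.choose 26 (j+1) := by
      rw [← Nat.choose_succ_right_eq, Nat.mul_div_cancel _ (by omega)]
    exact_mod_cast h

theorem pv_alt_closed (n : Int) (h2 : 2 ≤ n) (h26 : n ≤ 26) :
    calculate_p_alt n = (Nat.choose 26 n.toNat : Int) * ((2:Int) ^ n.toNat - n - 1) := by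
  rw [calculate_p_alt, if_pos ⟨h2, h26⟩, PySem.List.pyRange_one,
    show ((n:Int) - 0).toNat = n.toNat by omega, List.foldl_map,
    pv_comb_fold n.toNat (by omega)]

-- ===== VERDICT (by name: the statement is the Claim_ definition above) =====
theorem calculate_p_spec : Claim_equal_calculate_p := by
  intro n _
  unfold Spec_calculate_p
  rcases lt_or_ge n 2 with h | h2
  · have hr : PySem.List.pyRange 1 n 1 = [] := by
      rw [PySem.List.pyRange_one, show ((n:Int) - 1).toNat = 0 by omega]; rfl
    have hA : calculate_p n = 0 := by
      unfold calculate_p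
      rw [hr]
      rfl
    rw [hA, calculate_p_alt, if_neg (by omega)]
  · by_cases h26 : n ≤ 26
    · rw [pv_A_eq_T n h2, pv_T_eq_T2 _ (by omega), pv_T2_eq_T3 _ (by omega),
        pv_T3_closed _ (by omega) (by omega), pv_alt_closed n h2 h26]

      obtain ⟨N, rfl⟩ : ∃ N : Nat, n = (N : Int) := ⟨n.toNat, (Int.toNat_of_nonneg (by omega)).symm⟩
      have hpow : N < 2 ^ N := Nat.lt_two_pow_self
      rw [Int.toNat_natCast, Nat.cast_mul, Nat.cast_sub (by omega), Nat.cast_sub (by omega),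
        Nat.cast_pow]
      push_cast
      ring
    · rw [pv_A_eq_T n h2, pv_T_ge27 _ (by omega), calculate_p_alt, if_neg (by omega)]
      simp
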